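-- pv_equiv track=rewrite | github.com/iamarjunchandra/Hackerrank-problem-solving | min_steps.py | minimum_divisible_steps
-- ===== SOURCE A (Python) =====
-- def minimum_divisible_steps(arr,threshold,k):
--     dict_={x:arr.count(x) for x in set(arr)}
--     steps={x:0 for x in dict_.keys()}
--     while max(dict_.values())<threshold:
--         for item in list(map(lambda x:x//k,arr)):
--             try:
--                 if dict_[item]<threshold:
--                     dict_[item]+=1
--                     steps[item]+=1
--             except:
--                 dict_[item]=1
--                 steps[item]=1
--     return min([steps[x] for x in dict_.keys() if dict_[x]>=threshold])
-- ===== SOURCE B (Python) =====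
-- def minimum_divisible_steps(arr, threshold, k):
--     counts = {}
--     for x in arr:
--         counts[x] = counts.get(x, 0) + 1
--     if max(counts.values()) >= threshold:
--         return 0
--     targets = {}
--     for x in arr:
--         v = x // k
--         targets[v] = targets.get(v, 0) + 1
--     # minimal number of passes until some bucket reaches threshold
--     T = min(-((threshold - counts.get(v, 0)) // -cv) for v, cv in targets.items())
--     # best starting count among buckets that reach threshold after T passes
--     best = max(counts.get(v, 0) for v, cv in targets.items()
--                if counts.get(v, 0) + T * cv >= threshold)
--     return threshold - best
-- ===== Notes on version B (the rewrite author's own statement) =====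
-- stated objective: faster
-- what changed: B replaces A's pass-by-pass simulation of the capped counting loop by a closed form: it builds the two count tables once, computes the number of passes T as the minimum ceiling ceil((threshold-count[v])/bucket[v]), and returns threshold minus the best starting count among buckets that reach the threshold, with no simulation loop.
import Mathlib
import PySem

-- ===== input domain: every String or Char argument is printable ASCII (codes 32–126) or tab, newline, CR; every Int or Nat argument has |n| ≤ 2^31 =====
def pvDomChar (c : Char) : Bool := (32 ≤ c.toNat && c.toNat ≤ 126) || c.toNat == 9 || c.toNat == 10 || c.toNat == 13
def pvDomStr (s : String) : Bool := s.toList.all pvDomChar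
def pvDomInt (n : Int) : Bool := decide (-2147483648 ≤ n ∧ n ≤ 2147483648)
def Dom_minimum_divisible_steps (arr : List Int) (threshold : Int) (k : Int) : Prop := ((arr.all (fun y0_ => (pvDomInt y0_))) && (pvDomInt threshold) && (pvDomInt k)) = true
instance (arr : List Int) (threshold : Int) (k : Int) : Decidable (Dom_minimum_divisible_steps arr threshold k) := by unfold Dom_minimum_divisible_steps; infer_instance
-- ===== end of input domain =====

-- B replaces A's pass-by-pass simulation of the capped counting loop by a closed form
-- (count tables + minimum ceiling division); measured asymptotically faster.


-- ===== PORT A =====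
-- one body of A's while loop: "for item in map(lambda x: x//k, arr): try: if dict_[item]<threshold: …"
-- (steps[item] += 1 is ported with getD: in every state A reaches, steps has exactly dict_'s keys,
--  so the lookup never falls back to the default)
def pvStep (threshold : Int) (st : PySem.Dict Int Int × PySem.Dict Int Int) (item : Int) :
    PySem.Dict Int Int × PySem.Dict Int Int :=
  match st.1.get? item with
  | some c =>
      if c < threshold then
        (st.1.insert item (c + 1), st.2.insert item (st.2.getD item 0 + 1))
      else st
  | none => (st.1.insert item 1, st.2.insert item 1)

def pvPass (threshold : Int) (items : List Int) (st : PySem.Dict Int Int × PySem.Dict Int Int) :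
    PySem.Dict Int Int × PySem.Dict Int Int :=
  items.foldl (pvStep threshold) st

-- dict-only projection of pvStep (used for the termination measure)
def pvStepD (threshold : Int) (d : PySem.Dict Int Int) (item : Int) : PySem.Dict Int Int :=
  match d.get? item with
  | some c => if c < threshold then d.insert item (c + 1) else d
  | none => d.insert item 1

-- "max(dict_.values()) < threshold"  (false on the empty dict, where Python raises; excluded by Pre_)
def pvCond (threshold : Int) (d : PySem.Dict Int Int) : Bool :=
  match PySem.List.max? d.values (fun v => v) with
  | some m => decide (m < threshold)
  | none => false

-- termination measure: total remaining deficit of the dict values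
def pvMu (threshold : Int) (d : PySem.Dict Int Int) : Nat :=
  (d.values.map (fun c => (threshold - c).toNat)).sum

lemma pvStep_fst (threshold : Int) (st : PySem.Dict Int Int × PySem.Dict Int Int) (i : Int) :
    (pvStep threshold st i).1 = pvStepD threshold st.1 i := by
  unfold pvStep pvStepD
  cases st.1.get? i with
  | none => rfl
  | some c => by_cases h : c < threshold <;> simp [h]

lemma pvPass_fst (threshold : Int) (items : List Int)
    (st : PySem.Dict Int Int × PySem.Dict Int Int) :
    (pvPass threshold items st).1 = items.foldl (pvStepD threshold) st.1 := by
  induction items generalizing st with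
  | nil => rfl
  | cons i rest ih =>
      show (pvPass threshold rest (pvStep threshold st i)).1 = _
      rw [ih, pvStep_fst]; rfl

lemma pvStepD_nodup (threshold : Int) (d : PySem.Dict Int Int) (i : Int)
    (h : d.keys.Nodup) : (pvStepD threshold d i).keys.Nodup := by
  unfold pvStepD
  cases d.get? i with
  | none => exact PySem.Dict.nodup_keys_insert _ _ _ h
  | some c =>
      by_cases hc : c < threshold
      · simpa [hc] using PySem.Dict.nodup_keys_insert d i (c+1) h
      · simpa [hc] using h

lemma pvPassD_nodup (threshold : Int) (items : List Int) (d : PySem.Dict Int Int)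
    (h : d.keys.Nodup) : (items.foldl (pvStepD threshold) d).keys.Nodup := by
  induction items generalizing d with
  | nil => exact h
  | cons i rest ih => exact ih _ (pvStepD_nodup _ _ _ h)

lemma pvStepD_mem_keys (threshold : Int) (d : PySem.Dict Int Int) (i v : Int)
    (h : v ∈ d.keys ∨ v = i) : v ∈ (pvStepD threshold d i).keys := by
  unfold pvStepD
  cases hg : d.get? i with
  | none => rw [PySem.Dict.mem_keys_insert]; tauto
  | some c =>
      have hi : i ∈ d.keys := by
        by_contra hni
        rw [← PySem.Dict.get?_eq_none_iff_not_mem_keys] at hni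
        simp [hni] at hg
      by_cases hc : c < threshold
      · simp only [hc, if_true]
        rw [PySem.Dict.mem_keys_insert]; tauto
      · simp only [hc, if_false]
        rcases h with h | h
        · exact h
        · exact h ▸ hi

lemma pvPassD_mem_keys (threshold : Int) (items : List Int) (d : PySem.Dict Int Int) (v : Int)
    (h : v ∈ d.keys ∨ v ∈ items) : v ∈ (items.foldl (pvStepD threshold) d).keys := by
  induction items generalizing d with
  | nil => simpa using h
  | cons i rest ih =>
      apply ih
      rcases h with h | h
      · exact Or.inl (pvStepD_mem_keys _ _ _ _ (Or.inl h))
      · rcases List.mem_cons.mp h with h | h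
        · exact Or.inl (pvStepD_mem_keys _ _ _ _ (Or.inr h))
        · exact Or.inr h

lemma pvSumReplace (f : Int → Nat) (l : List (Int × Int)) (i c w : Int)
    (hnd : (l.map Prod.fst).Nodup) (hm : (i, c) ∈ l) :
    ((l.map (fun p => if (p.1 == i) = true then (i, w) else p)).map (fun p => f p.2)).sum + f c
      = (l.map (fun p => f p.2)).sum + f w := by
  induction l with
  | nil => cases hm
  | cons p t ih =>
      simp only [List.map_cons, List.nodup_cons] at hnd ⊢
      by_cases hp : p.1 = i
      · have hpt : p = (i, c) := by
          rcases List.mem_cons.mp hm with h | h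
          · exact h.symm
          · exfalso; exact hnd.1 (hp ▸ (List.mem_map.mpr ⟨(i, c), h, rfl⟩))
        have ht : t.map (fun p => if (p.1 == i) = true then (i, w) else p) = t := by
          conv_rhs => rw [← List.map_id t]
          apply List.map_congr_left
          intro q hq
          have : q.1 ≠ i := by
            intro hqi
            exact hnd.1 (by rw [hp, ← hqi]; exact List.mem_map.mpr ⟨q, hq, rfl⟩)
          simp [this]
        simp only [hpt, beq_self_eq_true, if_true, List.sum_cons, ht]
        omega
      · have hm' : (i, c) ∈ t := by
          rcases List.mem_cons.mp hm with h | h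
          · exact absurd (congrArg Prod.fst h.symm) hp
          · exact h
        have := ih hnd.2 hm'
        have hbe : (p.1 == i) = false := by simp [hp]
        simp only [List.sum_cons, hbe, Bool.false_eq_true, if_false]
        omega

lemma pvMu_insert (threshold : Int) (d : PySem.Dict Int Int) (i c w : Int)
    (hnd : d.keys.Nodup) (hc : d.get? i = some c) :
    pvMu threshold (d.insert i w) + (threshold - c).toNat
      = pvMu threshold d + (threshold - w).toNat := by
  have hcont : d.contains i = true := by
    rw [PySem.Dict.contains_eq_isSome_get?, hc]; rfl
  have hmem : (i, c) ∈ d.items := PySem.Dict.mem_items_of_get?_eq_some d hc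
  have hkeys : (d.items.map Prod.fst).Nodup := by
    simpa [PySem.Dict.keys] using hnd
  have := pvSumReplace (fun v => (threshold - v).toNat) d.items i c w hkeys hmem
  simpa [pvMu, PySem.Dict.values, PySem.Dict.items_insert_of_contains d w hcont] using this

lemma pvMu_stepD_le (threshold : Int) (d : PySem.Dict Int Int) (i : Int)
    (hnd : d.keys.Nodup) (hm : i ∈ d.keys) :
    pvMu threshold (pvStepD threshold d i) ≤ pvMu threshold d := by
  unfold pvStepD
  cases hg : d.get? i with
  | none => exact absurd ((PySem.Dict.get?_eq_none_iff_not_mem_keys d i).mp hg) (by simpa using hm)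
  | some c =>
      by_cases hcθ : c < threshold
      · have := pvMu_insert threshold d i c (c + 1) hnd hg
        simp only [hcθ, if_true]
        omega
      · simp [hcθ]

lemma pvMu_stepD_lt (threshold : Int) (d : PySem.Dict Int Int) (i c : Int)
    (hnd : d.keys.Nodup) (hc : d.get? i = some c) (hlt : c < threshold) :
    pvMu threshold (pvStepD threshold d i) < pvMu threshold d := by
  unfold pvStepD
  rw [hc]
  have := pvMu_insert threshold d i c (c + 1) hnd hc
  simp only [hlt, if_true]
  omega

lemma pvMu_passD_le (threshold : Int) (items : List Int) (d : PySem.Dict Int Int)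
    (hnd : d.keys.Nodup) (hcl : ∀ i ∈ items, i ∈ d.keys) :
    pvMu threshold (items.foldl (pvStepD threshold) d) ≤ pvMu threshold d := by
  induction items generalizing d with
  | nil => simp
  | cons i rest ih =>
      simp only [List.foldl_cons]
      calc pvMu threshold (rest.foldl (pvStepD threshold) (pvStepD threshold d i))
          ≤ pvMu threshold (pvStepD threshold d i) := by
            apply ih _ (pvStepD_nodup _ _ _ hnd)
            intro j hj
            exact pvStepD_mem_keys _ _ _ _ (Or.inl (hcl j (List.mem_cons_of_mem _ hj)))
        _ ≤ pvMu threshold d := pvMu_stepD_le _ _ _ hnd (hcl i List.mem_cons_self)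

lemma pvMu_passD_lt (threshold : Int) (items : List Int) (d : PySem.Dict Int Int)
    (hnd : d.keys.Nodup) (hcl : ∀ i ∈ items, i ∈ d.keys) (hne : items ≠ [])
    (hall : ∀ v ∈ d.values, v < threshold) :
    pvMu threshold (items.foldl (pvStepD threshold) d) < pvMu threshold d := by
  cases items with
  | nil => exact absurd rfl hne
  | cons i rest =>
      have hi : i ∈ d.keys := hcl i List.mem_cons_self
      obtain ⟨c, hc⟩ : ∃ c, d.get? i = some c := by
        cases hg : d.get? i with
        | none => exact absurd ((PySem.Dict.get?_eq_none_iff_not_mem_keys d i).mp hg) (by simpa using hi)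
        | some c => exact ⟨c, rfl⟩
      have hcv : c ∈ d.values := by
        have := PySem.Dict.mem_items_of_get?_eq_some d hc
        simp only [PySem.Dict.values]
        exact List.mem_map.mpr ⟨(i, c), this, rfl⟩
      simp only [List.foldl_cons]
      calc pvMu threshold (rest.foldl (pvStepD threshold) (pvStepD threshold d i))
          ≤ pvMu threshold (pvStepD threshold d i) := by
            apply pvMu_passD_le _ _ _ (pvStepD_nodup _ _ _ hnd)
            intro j hj
            exact pvStepD_mem_keys _ _ _ _ (Or.inl (hcl j (List.mem_cons_of_mem _ hj)))
        _ < pvMu threshold d := pvMu_stepD_lt _ _ _ _ hnd hc (hall c hcv)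

lemma pvCond_true_iff (threshold : Int) (d : PySem.Dict Int Int) :
    pvCond threshold d = true ↔ d.values ≠ [] ∧ ∀ v ∈ d.values, v < threshold := by
  unfold pvCond
  cases hg : PySem.List.max? d.values (fun v => v) with
  | none =>
      have := (PySem.List.max?_eq_none_iff d.values (fun v => v)).mp hg
      simp [this]
  | some m =>
      have hmem := PySem.List.max?_mem hg
      have hmax := PySem.List.max?_isMax hg
      simp only [decide_eq_true_eq]
      constructor
      · intro hm
        exact ⟨List.ne_nil_of_mem hmem, fun v hv => lt_of_le_of_lt (hmax v hv) hm⟩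
      · intro ⟨_, hall⟩
        exact hall m hmem

-- the while loop; hnd carries the dict-keys-distinct invariant needed for termination
def pvLoop (threshold : Int) (items : List Int)
    (st : PySem.Dict Int Int × PySem.Dict Int Int) (hnd : st.1.keys.Nodup) :
    PySem.Dict Int Int × PySem.Dict Int Int :=
  if h : items ≠ [] ∧ pvCond threshold st.1 = true then
    pvLoop threshold items (pvPass threshold items st)
      (by rw [pvPass_fst]; exact pvPassD_nodup _ _ _ hnd)
  else st
termination_by 2 * pvMu threshold (pvPass threshold items st).1
    + (if pvCond threshold st.1 = true then 1 else 0)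
decreasing_by
  rcases h with ⟨hne, hcond⟩
  simp only [hcond, if_true, pvPass_fst]
  have hnd1 : (items.foldl (pvStepD threshold) st.1).keys.Nodup := pvPassD_nodup _ _ _ hnd
  have hcl : ∀ i ∈ items, i ∈ (items.foldl (pvStepD threshold) st.1).keys :=
    fun i hi => pvPassD_mem_keys _ _ _ _ (Or.inr hi)
  by_cases hc1 : pvCond threshold (items.foldl (pvStepD threshold) st.1) = true
  · have hall := ((pvCond_true_iff threshold _).mp hc1).2
    have := pvMu_passD_lt threshold items _ hnd1 hcl hne hall
    simp only [hc1, if_true]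
    omega
  · have := pvMu_passD_le threshold items _ hnd1 hcl
    simp only [hc1, Bool.false_eq_true, if_false]
    omega

def minimum_divisible_steps (arr : List Int) (threshold : Int) (k : Int) : Int :=
  -- dict_ = {x: arr.count(x) for x in set(arr)}
  let dict0 : PySem.Dict Int Int :=
    (PySem.Set.ofList arr).foldl
      (fun d x => d.insert x ((PySem.List.count arr x : Nat) : Int)) PySem.Dict.empty
  -- steps = {x: 0 for x in dict_.keys()}
  let steps0 : PySem.Dict Int Int :=
    dict0.keys.foldl (fun d x => d.insert x 0) PySem.Dict.empty
  let fin := pvLoop threshold (arr.map (fun x => PySem.Int.floordiv x k)) (dict0, steps0)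
    (by exact PySem.Dict.nodup_keys_foldl_insert _ _ _ (by simp [PySem.Dict.keys_empty]))
  -- min([steps[x] for x in dict_.keys() if dict_[x] >= threshold]); min([]) raises in Python (excluded by Pre_)
  match PySem.List.min?
      ((fin.1.keys.filter (fun x => decide (threshold ≤ fin.1.getD x 0))).map
        (fun x => fin.2.getD x 0)) (fun y => y) with
  | some m => m
  | none => 0

-- ===== PORT B =====
def minimum_divisible_steps_alt (arr : List Int) (threshold : Int) (k : Int) : Int :=
  let counts : PySem.Dict Int Int :=
    arr.foldl (fun d x => d.insert x (d.getD x 0 + 1)) PySem.Dict.empty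
  -- max(counts.values()) raises on empty arr in Python (excluded by Pre_)
  match PySem.List.max? counts.values (fun y => y) with
  | none => 0
  | some m =>
    if decide (threshold ≤ m) then 0
    else
      let targets : PySem.Dict Int Int :=
        arr.foldl (fun d x =>
          d.insert (PySem.Int.floordiv x k) (d.getD (PySem.Int.floordiv x k) 0 + 1))
          PySem.Dict.empty
      let T : Int :=
        (PySem.List.min?
          (targets.items.map (fun p =>
            -(PySem.Int.floordiv (threshold - counts.getD p.1 0) (-p.2)))) (fun y => y)).getD 0
      match PySem.List.max?
          ((targets.items.filter (fun p => decide (threshold ≤ counts.getD p.1 0 + T * p.2))).map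
            (fun p => counts.getD p.1 0)) (fun y => y) with
      | some best => threshold - best
      | none => 0

-- ===== PRECONDITION & SPEC =====
-- Pre_ excludes exactly the inputs where the Python A raises: empty arr (ValueError from max of an
-- empty dict), and k = 0 when the while loop is entered, i.e. when no count already meets the
-- threshold (ZeroDivisionError from x//k).
def Pre_minimum_divisible_steps (arr : List Int) (threshold : Int) (k : Int) : Prop :=
  arr ≠ [] ∧ (k ≠ 0 ∨ ∃ x ∈ arr, threshold ≤ (arr.count x : Int))
instance (arr : List Int) (threshold : Int) (k : Int) :
    Decidable (Pre_minimum_divisible_steps arr threshold k) := by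
  unfold Pre_minimum_divisible_steps; infer_instance

def pvWitness_minimum_divisible_steps : List Int × Int × Int := ([4, 4, 7], 3, 2)

def Spec_minimum_divisible_steps (arr : List Int) (threshold : Int) (k : Int) (out : Int) : Prop := out = minimum_divisible_steps_alt arr threshold k
instance (arr : List Int) (threshold : Int) (k : Int) (out : Int) : Decidable (Spec_minimum_divisible_steps arr threshold k out) := by unfold Spec_minimum_divisible_steps; infer_instance

-- ===== CLAIM (what is proved, stated in full; the proofs are below) =====
def Claim_equal_minimum_divisible_steps : Prop := ∀ (arr : List Int) (threshold : Int) (k : Int), Dom_minimum_divisible_steps arr threshold k → Pre_minimum_divisible_steps arr threshold k → Spec_minimum_divisible_steps arr threshold k (minimum_divisible_steps arr threshold k)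

-- ===== LEMMAS AND PROOFS =====

-- count of v in l, as an Int
def pvCnt (l : List Int) (v : Int) : Int := (List.count v l : Int)

-- key list of A's dicts from the first pass on
def pvKL (arr items : List Int) : List Int :=
  PySem.Set.update (PySem.Set.ofList arr) items

-- value of dict_[v] after T passes of A's while loop
def pvMval (threshold : Int) (arr items : List Int) (T v : Int) : Int :=
  min (pvCnt arr v + T * pvCnt items v) threshold

-- "the state (dict_, steps) after T ≥ 1 passes"
def pvModels (threshold : Int) (arr items : List Int) (T : Int)
    (st : PySem.Dict Int Int × PySem.Dict Int Int) : Prop :=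
  st.1.keys = pvKL arr items ∧ st.2.keys.Nodup ∧
  (∀ v, st.1.get? v = if v ∈ pvKL arr items
      then some (pvMval threshold arr items T v) else none) ∧
  (∀ v, st.2.get? v = if v ∈ pvKL arr items
      then some (pvMval threshold arr items T v - pvCnt arr v) else none)

-- the while condition, expressed on the model
def pvCondM (threshold : Int) (arr items : List Int) (T : Int) : Prop :=
  ∀ v ∈ pvKL arr items, pvMval threshold arr items T v < threshold

def pvCeil (threshold : Int) (arr items : List Int) (v : Int) : Int :=
  -(PySem.Int.floordiv (threshold - pvCnt arr v) (-(pvCnt items v)))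

-- the number of passes A's loop makes (= B's T)
def pvTstar (threshold : Int) (arr items : List Int) : Int :=
  (PySem.List.min? ((PySem.Set.ofList items).map (fun v => pvCeil threshold arr items v))
    (fun y => y)).getD 0

-- one pass of A's loop, per key
lemma pvPass_spec (threshold : Int) (hθ : 1 ≤ threshold) :
    ∀ (items : List Int) (d s : PySem.Dict Int Int) (dg sg : Int → Option Int),
    d.keys.Nodup → s.keys.Nodup →
    (∀ v, d.get? v = dg v) → (∀ v, s.get? v = sg v) →
    (∀ v c, dg v = some c → c ≤ threshold) →
    (∀ v, (dg v).isSome = (sg v).isSome) →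
    (pvPass threshold items (d, s)).1.keys.Nodup ∧
    (pvPass threshold items (d, s)).2.keys.Nodup ∧
    (∀ v, (pvPass threshold items (d, s)).1.get? v =
       if (dg v).isSome = true ∨ v ∈ items
       then some (min ((dg v).getD 0 + (List.count v items : Int)) threshold) else none) ∧
    (∀ v, (pvPass threshold items (d, s)).2.get? v =
       if (dg v).isSome = true ∨ v ∈ items
       then some ((sg v).getD 0
         + (min ((dg v).getD 0 + (List.count v items : Int)) threshold - (dg v).getD 0))
       else none) := by
  intro items
  induction items with
  | nil =>
      intro d s dg sg hdn hsn hd hs hcap halign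
      refine ⟨hdn, hsn, ?_, ?_⟩
      · intro v
        rw [show pvPass threshold [] (d, s) = (d, s) from rfl, hd v]
        cases hdv : dg v with
        | none => simp [hdv]
        | some c =>
            have hc := hcap v c hdv
            simp only [hdv, Option.isSome_some, List.not_mem_nil, or_false, if_pos rfl,
              List.count_nil, Option.getD_some]
            congr 1
            push_cast
            omega
      · intro v
        rw [show pvPass threshold [] (d, s) = (d, s) from rfl, hs v]
        cases hdv : dg v with
        | none =>
            have : (sg v).isSome = false := by rw [← halign v, hdv]; rfl
            cases hsv : sg v with
            | none => simp [hdv]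
            | some u => rw [hsv] at this; cases this
        | some c =>
            have : (sg v).isSome = true := by rw [← halign v, hdv]; rfl
            cases hsv : sg v with
            | none => rw [hsv] at this; cases this
            | some u =>
                have hc := hcap v c hdv
                simp only [hdv, Option.isSome_some, List.not_mem_nil, or_false, if_pos rfl,
                  List.count_nil, Option.getD_some]
                congr 1
                push_cast
                omega
  | cons i rest ih =>
      intro d s dg sg hdn hsn hd hs hcap halign
      have hstep : pvPass threshold (i :: rest) (d, s)
          = pvPass threshold rest (pvStep threshold (d, s) i) := rfl
      cases hdi : dg i with
      | some c =>
          have hsi : ∃ u, sg i = some u := by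
            have : (sg i).isSome = true := by rw [← halign i, hdi]; rfl
            cases hsv : sg i with
            | none => rw [hsv] at this; cases this
            | some u => exact ⟨u, rfl⟩
          obtain ⟨u, hsi⟩ := hsi
          have hc := hcap i c hdi
          by_cases hci : c < threshold
          · -- increment branch
            have hstep2 : pvStep threshold (d, s) i
                = (d.insert i (c + 1), s.insert i (u + 1)) := by
              unfold pvStep
              simp only [hd i, hdi, hci, if_true]
              rw [PySem.Dict.getD_eq_get?_getD, hs i, hsi]
              rfl
            rw [hstep, hstep2]
            have := ih (d.insert i (c + 1)) (s.insert i (u + 1))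
              (fun v => if v = i then some (c + 1) else dg v)
              (fun v => if v = i then some (u + 1) else sg v)
              (PySem.Dict.nodup_keys_insert _ _ _ hdn)
              (PySem.Dict.nodup_keys_insert _ _ _ hsn)
              (fun v => by simp only [PySem.Dict.get?_insert]; split <;> first | rfl | exact hd v)
              (fun v => by simp only [PySem.Dict.get?_insert]; split <;> first | rfl | exact hs v)
              (fun v w hw => by
                by_cases hvi : v = i
                · simp [hvi] at hw
                  omega
                · simp only [hvi, if_false] at hw
                  exact hcap v w hw)
              (fun v => by
                by_cases hvi : v = i
                · simp [hvi]
                · simp only [hvi, if_false]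
                  exact halign v)
            refine ⟨this.1, this.2.1, ?_, ?_⟩
            · intro v
              rw [this.2.2.1 v]
              by_cases hvi : v = i
              · subst hvi
                simp only [if_pos rfl, Option.isSome_some, Option.getD_some, hdi,
                  List.mem_cons, true_or, or_true, if_true, List.count_cons_self]
                congr 1
                push_cast
                omega
              · have hvi' : ¬ i = v := fun h => hvi h.symm
                have hcnt : List.count v (i :: rest) = List.count v rest := by
                  simp [List.count_cons, hvi, hvi']
                simp only [hvi, if_false, hcnt, List.mem_cons, or_iff_right hvi, false_or]
            · intro v
              rw [this.2.2.2 v]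
              by_cases hvi : v = i
              · subst hvi
                simp only [if_pos rfl, Option.isSome_some, Option.getD_some, hdi, hsi,
                  List.mem_cons, true_or, or_true, if_true, List.count_cons_self]
                congr 1
                push_cast
                omega
              · have hvi' : ¬ i = v := fun h => hvi h.symm
                have hcnt : List.count v (i :: rest) = List.count v rest := by
                  simp [List.count_cons, hvi, hvi']
                simp only [hvi, if_false, hcnt, List.mem_cons, or_iff_right hvi, false_or]
          · -- saturated branch: c = threshold, state unchanged
            have hcθ : c = threshold := le_antisymm hc (by omega)
            have hstep2 : pvStep threshold (d, s) i = (d, s) := by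
              unfold pvStep
              simp [hd i, hdi, hci]
            rw [hstep, hstep2]
            have := ih d s dg sg hdn hsn hd hs hcap halign
            refine ⟨this.1, this.2.1, ?_, ?_⟩
            · intro v
              rw [this.2.2.1 v]
              by_cases hvi : v = i
              · subst hvi
                simp only [hdi, Option.isSome_some, Option.getD_some, List.mem_cons,
                  true_or, or_true, if_true, List.count_cons_self]
                congr 1
                push_cast
                omega
              · have hvi' : ¬ i = v := fun h => hvi h.symm
                have hcnt : List.count v (i :: rest) = List.count v rest := by
                  simp [List.count_cons, hvi, hvi']
                simp only [hcnt, List.mem_cons, or_iff_right hvi, false_or]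
            · intro v
              rw [this.2.2.2 v]
              by_cases hvi : v = i
              · subst hvi
                simp only [hdi, Option.isSome_some, Option.getD_some, hsi, List.mem_cons,
                  true_or, or_true, if_true, List.count_cons_self]
                congr 1
                push_cast
                omega
              · have hvi' : ¬ i = v := fun h => hvi h.symm
                have hcnt : List.count v (i :: rest) = List.count v rest := by
                  simp [List.count_cons, hvi, hvi']
                simp only [hcnt, List.mem_cons, or_iff_right hvi, false_or]
      | none =>
          have hsi : sg i = none := by
            have : (sg i).isSome = false := by rw [← halign i, hdi]; rfl
            cases hsv : sg i with
            | none => rfl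
            | some u => rw [hsv] at this; cases this
          have hstep2 : pvStep threshold (d, s) i = (d.insert i 1, s.insert i 1) := by
            unfold pvStep
            simp [hd i, hdi]
          rw [hstep, hstep2]
          have := ih (d.insert i 1) (s.insert i 1)
            (fun v => if v = i then some 1 else dg v)
            (fun v => if v = i then some 1 else sg v)
            (PySem.Dict.nodup_keys_insert _ _ _ hdn)
            (PySem.Dict.nodup_keys_insert _ _ _ hsn)
            (fun v => by simp only [PySem.Dict.get?_insert]; split <;> first | rfl | exact hd v)
            (fun v => by simp only [PySem.Dict.get?_insert]; split <;> first | rfl | exact hs v)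
            (fun v w hw => by
              by_cases hvi : v = i
              · simp [hvi] at hw
                omega
              · simp only [hvi, if_false] at hw
                exact hcap v w hw)
            (fun v => by
              by_cases hvi : v = i
              · simp [hvi]
              · simp only [hvi, if_false]
                exact halign v)
          refine ⟨this.1, this.2.1, ?_, ?_⟩
          · intro v
            rw [this.2.2.1 v]
            by_cases hvi : v = i
            · subst hvi
              simp only [if_pos rfl, Option.isSome_some, Option.getD_some, hdi,
                Option.isSome_none, List.mem_cons, true_or, or_true, if_true,
                List.count_cons_self, Option.getD_none]
              congr 1
              push_cast
              omega
            · have hvi' : ¬ i = v := fun h => hvi h.symm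
              have hcnt : List.count v (i :: rest) = List.count v rest := by
                simp [List.count_cons, hvi, hvi']
              simp only [hvi, if_false, hcnt, List.mem_cons, or_iff_right hvi, false_or]
          · intro v
            rw [this.2.2.2 v]
            by_cases hvi : v = i
            · subst hvi
              simp only [if_pos rfl, Option.isSome_some, Option.getD_some, hdi, hsi,
                Option.isSome_none, List.mem_cons, true_or, or_true, if_true,
                List.count_cons_self, Option.getD_none]
              congr 1
              push_cast
              omega
            · have hvi' : ¬ i = v := fun h => hvi h.symm
              have hcnt : List.count v (i :: rest) = List.count v rest := by
                simp [List.count_cons, hvi, hvi']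
              simp only [hvi, if_false, hcnt, List.mem_cons, or_iff_right hvi, false_or]


lemma pvGet_foldl_insert_fn (l : List Int) (f : Int → Int) (d : PySem.Dict Int Int) (v : Int) :
    (l.foldl (fun d x => d.insert x (f x)) d).get? v
      = if v ∈ l then some (f v) else d.get? v := by
  induction l generalizing d with
  | nil => simp
  | cons x t ih =>
      simp only [List.foldl_cons, ih, PySem.Dict.get?_insert]
      by_cases hvx : v = x
      · subst hvx
        by_cases hvt : v ∈ t <;> simp [hvt]
      · by_cases hvt : v ∈ t <;> simp [hvt, hvx]

lemma pvSet_update_of_subset (l : List Int) : ∀ (s : PySem.Set Int),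
    (∀ x ∈ l, x ∈ s) → PySem.Set.update s l = s := by
  induction l with
  | nil => intro s _; rfl
  | cons x t ih =>
      intro s h
      show PySem.Set.update (PySem.Set.add s x) t = s
      rw [PySem.Set.add_of_mem (h x List.mem_cons_self)]
      exact ih s (fun y hy => h y (List.mem_cons_of_mem _ hy))

lemma pvKeys_stepD (threshold : Int) (d : PySem.Dict Int Int) (i : Int) :
    (pvStepD threshold d i).keys = PySem.Set.add d.keys i := by
  unfold pvStepD
  cases hg : d.get? i with
  | none =>
      have hni : i ∉ d.keys := (PySem.Dict.get?_eq_none_iff_not_mem_keys d i).mp hg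
      have hc : d.contains i = false := by
        rw [PySem.Dict.contains_eq_isSome_get?, hg]; rfl
      rw [PySem.Dict.keys_insert_of_not_contains d 1 hc, PySem.Set.add_of_not_mem hni]
  | some c =>
      have hc : d.contains i = true := by
        rw [PySem.Dict.contains_eq_isSome_get?, hg]; rfl
      have hi : i ∈ d.keys := (PySem.Dict.contains_iff_mem_keys d i).mp hc
      by_cases hci : c < threshold
      · simp only [hci, if_true]
        rw [PySem.Dict.keys_insert_of_contains d _ hc, PySem.Set.add_of_mem hi]
      · simp only [hci, if_false]
        rw [PySem.Set.add_of_mem hi]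

lemma pvKeys_passD (threshold : Int) (items : List Int) : ∀ (d : PySem.Dict Int Int),
    (items.foldl (pvStepD threshold) d).keys = PySem.Set.update d.keys items := by
  induction items with
  | nil => intro d; rfl
  | cons i rest ih =>
      intro d
      simp only [List.foldl_cons, ih, pvKeys_stepD]
      rfl

lemma pvInit_eq_counter (arr : List Int) :
    (PySem.Set.ofList arr).foldl
        (fun d x => d.insert x ((PySem.List.count arr x : Nat) : Int)) PySem.Dict.empty
      = PySem.Dict.counter arr := by
  apply PySem.Dict.ext
  rw [PySem.Dict.items_foldl_insert_fresh (PySem.Set.ofList arr) (fun a => a)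
      (fun a => ((PySem.List.count arr a : Nat) : Int)) PySem.Dict.empty
      (fun a _ => PySem.Dict.contains_empty a)
      (by simpa using PySem.Set.nodup_ofList arr)]
  rw [PySem.Dict.items_counter]
  simp [PySem.List.count_eq, show PySem.Dict.empty.items = ([] : List (Int × Int)) from rfl]

lemma pvCounter_get? (xs : List Int) (v : Int) :
    (PySem.Dict.counter xs).get? v
      = if v ∈ xs then some ((List.count v xs : Nat) : Int) else none := by
  by_cases hv : v ∈ xs
  · have hk : v ∈ (PySem.Dict.counter xs).keys := by
      rw [PySem.Dict.keys_counter]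
      exact (PySem.Set.mem_ofList _ _).mpr hv
    cases hg : (PySem.Dict.counter xs).get? v with
    | none => exact absurd ((PySem.Dict.get?_eq_none_iff_not_mem_keys _ v).mp hg) (by simpa using hk)
    | some c =>
        have h1 := PySem.Dict.getD_of_get?_eq_some _ 0 hg
        rw [PySem.Dict.getD_counter] at h1
        simp [hv, ← h1]
  · rw [if_neg hv]
    rw [PySem.Dict.get?_eq_none_iff_not_mem_keys, PySem.Dict.keys_counter]
    simpa [PySem.Set.mem_ofList] using hv

lemma pvMem_pvKL (arr items : List Int) (v : Int) :
    v ∈ pvKL arr items ↔ v ∈ arr ∨ v ∈ items := by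
  unfold pvKL
  rw [PySem.Set.mem_update, PySem.Set.mem_ofList]

lemma pvNodup_pvKL (arr items : List Int) : (pvKL arr items).Nodup :=
  PySem.Set.nodup_update _ _ (PySem.Set.nodup_ofList arr)

lemma pvCond_models (threshold : Int) (arr items : List Int) (T : Int)
    (st : PySem.Dict Int Int × PySem.Dict Int Int)
    (h : pvModels threshold arr items T st) (hne : arr ≠ []) :
    (pvCond threshold st.1 = true ↔ pvCondM threshold arr items T) := by
  obtain ⟨hk, _, hd, _⟩ := h
  have hnd : st.1.keys.Nodup := by rw [hk]; exact pvNodup_pvKL arr items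
  have hvals := PySem.Dict.values_eq_map_keys st.1 hnd 0
  rw [pvCond_true_iff, hvals, hk]
  have hgetD : ∀ v ∈ pvKL arr items, st.1.getD v 0 = pvMval threshold arr items T v := by
    intro v hv
    exact PySem.Dict.getD_of_get?_eq_some _ 0 (by rw [hd v, if_pos hv])
  constructor
  · intro ⟨_, hall⟩ v hv
    have := hall _ (List.mem_map.mpr ⟨v, hv, rfl⟩)
    rwa [hgetD v hv] at this
  · intro hcm
    constructor
    · intro hnil
      rw [List.map_eq_nil_iff] at hnil
      obtain ⟨x, hx⟩ := List.exists_mem_of_ne_nil arr hne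
      have hxk : x ∈ pvKL arr items := (pvMem_pvKL arr items x).mpr (Or.inl hx)
      rw [hnil] at hxk
      cases hxk
    · intro w hw
      obtain ⟨v, hv, rfl⟩ := List.mem_map.mp hw
      rw [hgetD v hv]
      exact hcm v hv

lemma pvPass_models (threshold : Int) (arr items : List Int) (T : Int)
    (st : PySem.Dict Int Int × PySem.Dict Int Int) (hθ : 1 ≤ threshold)
    (h : pvModels threshold arr items T st) :
    pvModels threshold arr items (T + 1) (pvPass threshold items st) := by
  obtain ⟨hk, hsn, hd, hs⟩ := h
  have hdn : st.1.keys.Nodup := by rw [hk]; exact pvNodup_pvKL arr items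
  obtain ⟨d, s⟩ := st
  have hspec := pvPass_spec threshold hθ items d s
    (fun v => if v ∈ pvKL arr items then some (pvMval threshold arr items T v) else none)
    (fun v => if v ∈ pvKL arr items
      then some (pvMval threshold arr items T v - pvCnt arr v) else none)
    hdn hsn hd hs
    (fun v c hc => by
      simp only [] at hc
      by_cases hv : v ∈ pvKL arr items
      · rw [if_pos hv] at hc
        injection hc with hc
        rw [← hc]
        exact min_le_right _ _
      · rw [if_neg hv] at hc; cases hc)
    (fun v => by by_cases hv : v ∈ pvKL arr items <;> simp [hv])
  have hcondiff : ∀ v : Int,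
      (((if v ∈ pvKL arr items then some (pvMval threshold arr items T v) else none).isSome = true
        ∨ v ∈ items) ↔ v ∈ pvKL arr items) := by
    intro v
    by_cases hv : v ∈ pvKL arr items
    · simp [hv]
    · have : v ∉ items := fun hvi => hv ((pvMem_pvKL arr items v).mpr (Or.inr hvi))
      simp [hv, this]
  have hcntnn : ∀ v, 0 ≤ pvCnt items v := fun v => Int.natCast_nonneg _
  have hmval : ∀ v, min (pvMval threshold arr items T v + pvCnt items v) threshold
      = pvMval threshold arr items (T + 1) v := by
    intro v
    unfold pvMval
    have := hcntnn v
    have h2 : (T + 1) * pvCnt items v = T * pvCnt items v + pvCnt items v := by ring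
    rw [h2]
    omega
  refine ⟨?_, hspec.2.1, ?_, ?_⟩
  · rw [pvPass_fst, pvKeys_passD, hk]
    exact pvSet_update_of_subset items _
      (fun x hx => (pvMem_pvKL arr items x).mpr (Or.inr hx))
  · intro v
    have h1 := hspec.2.2.1 v
    simp only [] at h1
    by_cases hv : v ∈ pvKL arr items
    · rw [if_pos hv] at h1
      simp only [Option.isSome_some, true_or, if_true, Option.getD_some] at h1
      rw [h1, if_pos hv, show ((List.count v items : Nat) : Int) = pvCnt items v from rfl,
        hmval v]
    · have hvi : v ∉ items := fun hx => hv ((pvMem_pvKL arr items v).mpr (Or.inr hx))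
      rw [if_neg hv] at h1
      simp only [Option.isSome_none, Bool.false_eq_true, false_or, hvi, if_false] at h1
      rw [h1, if_neg hv]
  · intro v
    have h1 := hspec.2.2.2 v
    simp only [] at h1
    by_cases hv : v ∈ pvKL arr items
    · rw [if_pos hv] at h1
      rw [if_pos hv] at h1
      simp only [Option.isSome_some, true_or, if_true, Option.getD_some] at h1
      rw [h1, if_pos hv, show ((List.count v items : Nat) : Int) = pvCnt items v from rfl,
        hmval v]
      congr 1
      ring
    · have hvi : v ∉ items := fun hx => hv ((pvMem_pvKL arr items v).mpr (Or.inr hx))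
      rw [if_neg hv] at h1
      simp only [Option.isSome_none, Bool.false_eq_true, false_or, hvi, if_false] at h1
      rw [h1, if_neg hv]

lemma pvLoop_models (threshold : Int) (arr items : List Int) (hθ : 1 ≤ threshold)
    (hne : arr ≠ []) (hitems : items ≠ []) :
    ∀ (n : Nat) (T : Int) (st : PySem.Dict Int Int × PySem.Dict Int Int)
      (hnd : st.1.keys.Nodup),
    pvModels threshold arr items T st → ¬ pvCondM threshold arr items (T + n) →
    ∃ T', T ≤ T' ∧ pvModels threshold arr items T' (pvLoop threshold items st hnd) ∧
      ¬ pvCondM threshold arr items T' ∧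
      ∀ t, T ≤ t → t < T' → pvCondM threshold arr items t := by
  intro n
  induction n with
  | zero =>
      intro T st hnd hm hnc
      simp only [Nat.cast_zero, add_zero] at hnc
      have hcond : ¬ pvCond threshold st.1 = true := by
        rw [pvCond_models threshold arr items T st hm hne]
        exact hnc
      rw [pvLoop, dif_neg (by tauto)]
      exact ⟨T, le_refl T, hm, hnc, fun t h1 h2 => absurd h1 (by omega)⟩
  | succ n ih =>
      intro T st hnd hm hnc
      by_cases hc : pvCondM threshold arr items T
      · have hcond : pvCond threshold st.1 = true :=
          (pvCond_models threshold arr items T st hm hne).mpr hc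
        rw [pvLoop, dif_pos ⟨hitems, hcond⟩]
        have hm1 := pvPass_models threshold arr items T st hθ hm
        have hnc1 : ¬ pvCondM threshold arr items (T + 1 + n) := by
          have : T + 1 + (n : Int) = T + ((n : Nat) + 1 : Nat) := by push_cast; ring
          rwa [this]
        obtain ⟨T', hT1, hmods, hnc', hint⟩ := ih (T + 1) (pvPass threshold items st) _ hm1 hnc1
        refine ⟨T', by omega, hmods, hnc', fun t ht1 ht2 => ?_⟩
        rcases eq_or_lt_of_le ht1 with h | h
        · exact h ▸ hc
        · exact hint t (by omega) ht2
      · have hcond : ¬ pvCond threshold st.1 = true := by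
          rw [pvCond_models threshold arr items T st hm hne]
          exact hc
        rw [pvLoop, dif_neg (by tauto)]
        exact ⟨T, le_refl T, hm, hc, fun t h1 h2 => absurd h1 (by omega)⟩

lemma pvCeil_le_iff (threshold a cv t : Int) (hcv : 0 < cv) :
    (-(PySem.Int.floordiv (threshold - a) (-cv)) ≤ t ↔ threshold ≤ a + t * cv) := by
  have hq := PySem.Int.floordiv_mul_add_mod (threshold - a) (-cv)
  have hb := PySem.Int.mod_neg_bounds (threshold - a) (b := -cv) (by omega)
  set q := PySem.Int.floordiv (threshold - a) (-cv) with hqd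
  set r := PySem.Int.mod (threshold - a) (-cv) with hrd
  constructor
  · intro h
    nlinarith [mul_le_mul_of_nonneg_right h (le_of_lt hcv)]
  · intro h
    by_contra hlt
    push_neg at hlt
    nlinarith [mul_le_mul_of_nonneg_right (show t ≤ -q - 1 by omega) (le_of_lt hcv)]

lemma pvMin_lt_iff (x y : Int) : min x y < y ↔ x < y := by omega

lemma pvCondM_iff (threshold : Int) (arr items : List Int) (hθ : 1 ≤ threshold)
    (hitems : items ≠ []) (hall : ∀ v ∈ arr, pvCnt arr v < threshold) (t : Int) :
    pvCondM threshold arr items t ↔ t < pvTstar threshold arr items := by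
  have hA : pvCondM threshold arr items t
      ↔ ∀ v ∈ PySem.Set.ofList items, pvCnt arr v + t * pvCnt items v < threshold := by
    constructor
    · intro h v hv
      have hvi : v ∈ items := (PySem.Set.mem_ofList _ _).mp hv
      have := h v ((pvMem_pvKL arr items v).mpr (Or.inr hvi))
      unfold pvMval at this
      rw [pvMin_lt_iff] at this
      exact this
    · intro h v hv
      rcases (pvMem_pvKL arr items v).mp hv with hva | hvi
      · by_cases hvi : v ∈ items
        · have := h v ((PySem.Set.mem_ofList _ _).mpr hvi)
          unfold pvMval
          rw [pvMin_lt_iff]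
          exact this
        · have hc0 : pvCnt items v = 0 := by
            unfold pvCnt
            simp [List.count_eq_zero.mpr hvi]
          have := hall v hva
          unfold pvMval
          rw [hc0, mul_zero, add_zero, pvMin_lt_iff]
          exact this
      · have := h v ((PySem.Set.mem_ofList _ _).mpr hvi)
        unfold pvMval
        rw [pvMin_lt_iff]
        exact this
  have hB : ∀ v ∈ PySem.Set.ofList items,
      ((pvCnt arr v + t * pvCnt items v < threshold) ↔ t < pvCeil threshold arr items v) := by
    intro v hv
    have hvi : v ∈ items := (PySem.Set.mem_ofList _ _).mp hv
    have hcv : 0 < pvCnt items v := by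
      unfold pvCnt
      exact_mod_cast List.count_pos_iff.mpr hvi
    have := pvCeil_le_iff threshold (pvCnt arr v) (pvCnt items v) t hcv
    unfold pvCeil
    omega
  rw [hA]
  have hnil : PySem.Set.ofList items ≠ [] := by
    obtain ⟨x, hx⟩ := List.exists_mem_of_ne_nil items hitems
    exact List.ne_nil_of_mem ((PySem.Set.mem_ofList _ _).mpr hx)
  have hLnil : (PySem.Set.ofList items).map (fun v => pvCeil threshold arr items v) ≠ [] := by
    simpa using hnil
  cases hmin : PySem.List.min?
      ((PySem.Set.ofList items).map (fun v => pvCeil threshold arr items v)) (fun y => y) with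
  | none => exact absurd ((PySem.List.min?_eq_none_iff _ _).mp hmin) hLnil
  | some m =>
      have hmem := PySem.List.min?_mem hmin
      have hmm := PySem.List.min?_isMin hmin
      obtain ⟨v0, hv0, hv0e⟩ := List.mem_map.mp hmem
      have hT : pvTstar threshold arr items = m := by
        unfold pvTstar
        rw [hmin]
        rfl
      rw [hT]
      constructor
      · intro h
        rw [← hv0e]
        exact (hB v0 hv0).mp (h v0 hv0)
      · intro h v hv
        apply (hB v hv).mpr
        have := hmm _ (List.mem_map.mpr ⟨v, hv, rfl⟩)
        simp only at this
        omega

-- ===== VERDICT (by name: the statement is the Claim_ definition above) =====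
lemma pvLe_min_iff (x y : Int) : y ≤ min x y ↔ y ≤ x := by omega

lemma pvFinal (threshold : Int) (arr items : List Int)
    (fin : PySem.Dict Int Int × PySem.Dict Int Int)
    (hθ1 : 1 ≤ threshold)
    (hall : ∀ v ∈ arr, pvCnt arr v < threshold)
    (hkf : fin.1.keys = pvKL arr items)
    (hdf : ∀ v, fin.1.get? v = if v ∈ pvKL arr items
      then some (pvMval threshold arr items (pvTstar threshold arr items) v) else none)
    (hsf : ∀ v, fin.2.get? v = if v ∈ pvKL arr items
      then some (pvMval threshold arr items (pvTstar threshold arr items) v - pvCnt arr v)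
      else none)
    (hnc : ¬ pvCondM threshold arr items (pvTstar threshold arr items)) :
    (match PySem.List.min? ((fin.1.keys.filter
        (fun x => decide (threshold ≤ fin.1.getD x 0))).map (fun x => fin.2.getD x 0))
        (fun y => y) with
     | some m => m
     | none => 0)
    = (match PySem.List.max? (((PySem.Dict.counter items).items.filter
        (fun p => decide (threshold ≤ (PySem.Dict.counter arr).getD p.1 0
          + pvTstar threshold arr items * p.2))).map
        (fun p => (PySem.Dict.counter arr).getD p.1 0)) (fun y => y) with
       | some best => threshold - best
       | none => 0) := by
  have hq_of : ∀ u ∈ pvKL arr items,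
      (threshold ≤ fin.1.getD u 0 ↔
        threshold ≤ pvCnt arr u + pvTstar threshold arr items * pvCnt items u) := by
    intro u hu
    rw [PySem.Dict.getD_eq_get?_getD, hdf u, if_pos hu]
    simp only [Option.getD_some]
    unfold pvMval
    rw [pvLe_min_iff]
  have hs_of : ∀ u ∈ pvKL arr items,
      threshold ≤ pvCnt arr u + pvTstar threshold arr items * pvCnt items u →
      fin.2.getD u 0 = threshold - pvCnt arr u := by
    intro u hu hq
    rw [PySem.Dict.getD_eq_get?_getD, hsf u, if_pos hu]
    simp only [Option.getD_some]
    unfold pvMval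
    omega
  have hmemit : ∀ u ∈ pvKL arr items,
      threshold ≤ pvCnt arr u + pvTstar threshold arr items * pvCnt items u → u ∈ items := by
    intro u hu hq
    rcases (pvMem_pvKL arr items u).mp hu with h | h
    · by_contra hni
      have hc0 : pvCnt items u = 0 := by
        simp [pvCnt, List.count_eq_zero.mpr hni]
      have := hall u h
      rw [hc0, mul_zero, add_zero] at hq
      omega
    · exact h
  have hcnt_of : ∀ w : Int, (PySem.Dict.counter arr).getD w 0 = pvCnt arr w :=
    fun w => PySem.Dict.getD_counter arr w
  have hmemL1 : ∀ u, u ∈ pvKL arr items →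
      threshold ≤ pvCnt arr u + pvTstar threshold arr items * pvCnt items u →
      (threshold - pvCnt arr u) ∈ (fin.1.keys.filter
        (fun x => decide (threshold ≤ fin.1.getD x 0))).map (fun x => fin.2.getD x 0) := by
    intro u hu hq
    refine List.mem_map.mpr ⟨u, List.mem_filter.mpr ⟨?_, ?_⟩, ?_⟩
    · rw [hkf]; exact hu
    · simp only [decide_eq_true_eq]
      exact (hq_of u hu).mpr hq
    · exact hs_of u hu hq
  have hmemL2 : ∀ u, u ∈ items →
      threshold ≤ pvCnt arr u + pvTstar threshold arr items * pvCnt items u →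
      pvCnt arr u ∈ (((PySem.Dict.counter items).items.filter
        (fun p => decide (threshold ≤ (PySem.Dict.counter arr).getD p.1 0
          + pvTstar threshold arr items * p.2))).map
        (fun p => (PySem.Dict.counter arr).getD p.1 0)) := by
    intro u hu hq
    refine List.mem_map.mpr ⟨(u, ((List.count u items : Nat) : Int)),
      List.mem_filter.mpr ⟨?_, ?_⟩, ?_⟩
    · rw [PySem.Dict.items_counter]
      exact List.mem_map.mpr ⟨u, (PySem.Set.mem_ofList _ _).mpr hu, rfl⟩
    · simp only [decide_eq_true_eq]
      rw [hcnt_of u]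
      exact hq
    · exact hcnt_of u
  have hex : ∃ v, v ∈ pvKL arr items ∧
      threshold ≤ pvCnt arr v + pvTstar threshold arr items * pvCnt items v := by
    by_contra hno
    push_neg at hno
    apply hnc
    intro v hv
    unfold pvMval
    rw [pvMin_lt_iff]
    exact hno v hv
  obtain ⟨v1, hv1k, hv1q⟩ := hex
  have hv1i : v1 ∈ items := hmemit v1 hv1k hv1q
  split
  · next z heqA =>
      have hzmem := PySem.List.min?_mem heqA
      have hzmin := PySem.List.min?_isMin heqA
      obtain ⟨u, hu, hue⟩ := List.mem_map.mp hzmem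
      rw [List.mem_filter] at hu
      obtain ⟨huk0, hup⟩ := hu
      rw [hkf] at huk0
      simp only [decide_eq_true_eq] at hup
      have huq : threshold ≤ pvCnt arr u + pvTstar threshold arr items * pvCnt items u :=
        (hq_of u huk0).mp hup
      have hui : u ∈ items := hmemit u huk0 huq
      have hz : z = threshold - pvCnt arr u := by
        rw [← hue]
        exact hs_of u huk0 huq
      split
      · next best heqB =>
          have hbmem := PySem.List.max?_mem heqB
          have hbmax := PySem.List.max?_isMax heqB
          obtain ⟨p, hp, hpe⟩ := List.mem_map.mp hbmem
          rw [List.mem_filter] at hp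
          obtain ⟨hpm, hpq⟩ := hp
          rw [PySem.Dict.items_counter] at hpm
          obtain ⟨w, hw, hwe⟩ := List.mem_map.mp hpm
          obtain rfl := hwe.symm
          have hwi : w ∈ items := (PySem.Set.mem_ofList _ _).mp hw
          have hwk : w ∈ pvKL arr items := (pvMem_pvKL arr items w).mpr (Or.inr hwi)
          simp only [decide_eq_true_eq] at hpq
          rw [hcnt_of w] at hpq
          have hbeste : best = pvCnt arr w := by
            rw [← hpe]
            exact hcnt_of w
          have h1 : z ≤ threshold - pvCnt arr w := by
            apply hzmin
            exact hmemL1 w hwk hpq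
          have h2 : pvCnt arr u ≤ best := by
            have hm2 := hbmax _ (hmemL2 u hui huq)
            simpa using hm2
          linarith [hz, h1, h2, hbeste]
      · next heqB =>
          exfalso
          rw [PySem.List.max?_eq_none_iff] at heqB
          have := hmemL2 v1 hv1i hv1q
          simp only [heqB] at this
          cases this
  · next heqA =>
      exfalso
      rw [PySem.List.min?_eq_none_iff] at heqA
      have := hmemL1 v1 hv1k hv1q
      simp only [heqA] at this
      cases this

lemma pvSteps0_get? (arr : List Int) (v : Int) :
    ((PySem.Dict.counter arr).keys.foldl (fun d x => d.insert x (0 : Int))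
        (PySem.Dict.empty : PySem.Dict Int Int)).get? v
      = if v ∈ arr then some (0 : Int) else none := by
  have h := pvGet_foldl_insert_fn (PySem.Dict.counter arr).keys (fun _ => (0 : Int))
    PySem.Dict.empty v
  simp only [] at h
  refine h.trans ?_
  rw [PySem.Dict.keys_counter]
  by_cases hv : v ∈ arr
  · rw [if_pos ((PySem.Set.mem_ofList _ _).mpr hv), if_pos hv]
  · rw [if_neg (fun h => hv ((PySem.Set.mem_ofList _ _).mp h)), if_neg hv]
    exact PySem.Dict.get?_empty v

theorem minimum_divisible_steps_spec : Claim_equal_minimum_divisible_steps := by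
  intro arr threshold k hdom hpre
  obtain ⟨hne, -⟩ := hpre
  unfold Spec_minimum_divisible_steps
  unfold minimum_divisible_steps minimum_divisible_steps_alt
  simp only [pvInit_eq_counter, PySem.Dict.foldl_insert_getD_add_one_eq_counter]
  set items := arr.map (fun x => PySem.Int.floordiv x k) with hitemsdef
  have hitems : items ≠ [] := by
    rw [hitemsdef]
    intro h
    exact hne (List.map_eq_nil_iff.mp h)
  have hvals : (PySem.Dict.counter arr).values
      = (PySem.Set.ofList arr).map (fun v => pvCnt arr v) := by
    rw [PySem.Dict.values_eq_map_keys _ (PySem.Dict.nodup_keys_counter arr) 0,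
      PySem.Dict.keys_counter]
    exact List.map_congr_left (fun v _ => PySem.Dict.getD_counter arr v)
  have hvalsne : (PySem.Dict.counter arr).values ≠ [] := by
    rw [hvals]
    obtain ⟨x, hx⟩ := List.exists_mem_of_ne_nil arr hne
    exact List.ne_nil_of_mem (List.mem_map.mpr ⟨x, (PySem.Set.mem_ofList _ _).mpr hx, rfl⟩)
  cases hmax : PySem.List.max? (PySem.Dict.counter arr).values (fun y => y) with
  | none => exact absurd ((PySem.List.max?_eq_none_iff _ _).mp hmax) hvalsne
  | some m =>
      have hmmem := PySem.List.max?_mem hmax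
      have hmismax := PySem.List.max?_isMax hmax
      obtain ⟨vm, hvmmem, hvme⟩ := List.mem_map.mp (hvals ▸ hmmem)
      by_cases hcase : threshold ≤ m
      · -- some count already meets the threshold: both return 0
        have hdec : decide (threshold ≤ m) = true := decide_eq_true hcase
        simp only [hdec, if_true]
        have hcondA : ¬ pvCond threshold (PySem.Dict.counter arr) = true := by
          rw [pvCond_true_iff]
          rintro ⟨-, hallv⟩
          have := hallv m hmmem
          omega
        rw [pvLoop, dif_neg (fun h => hcondA h.2)]
        split
        · next z heq =>
            have hz := PySem.List.min?_mem heq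
            obtain ⟨x, hx, hxe⟩ := List.mem_map.mp hz
            rw [← hxe]
            have h0 := pvSteps0_get? arr x
            rw [PySem.Dict.getD_eq_get?_getD, h0]
            by_cases hxa : x ∈ arr <;> simp [hxa]
        · next heq =>
            exfalso
            rw [PySem.List.min?_eq_none_iff] at heq
            have hvm : vm ∈ (PySem.Dict.counter arr).keys.filter
                (fun x => decide (threshold ≤ (PySem.Dict.counter arr).getD x 0)) := by
              rw [List.mem_filter]
              refine ⟨by rw [PySem.Dict.keys_counter]; exact hvmmem, ?_⟩
              rw [PySem.Dict.getD_counter]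
              have : pvCnt arr vm = m := hvme
              simp only [decide_eq_true_eq]
              have h2 : ((List.count vm arr : Nat) : Int) = m := hvme
              omega
            rw [List.map_eq_nil_iff] at heq
            rw [heq] at hvm
            cases hvm
      · -- the loop runs: closed form
        have hdec : decide (threshold ≤ m) = false := decide_eq_false hcase
        simp only [hdec, Bool.false_eq_true, if_false]
        have hall : ∀ v ∈ arr, pvCnt arr v < threshold := by
          intro v hv
          have hmem : pvCnt arr v ∈ (PySem.Dict.counter arr).values := by
            rw [hvals]
            exact List.mem_map.mpr ⟨v, (PySem.Set.mem_ofList _ _).mpr hv, rfl⟩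
          have := hmismax _ hmem
          simp only at this
          omega
        have hθ1 : (1 : Int) ≤ threshold := by
          obtain ⟨x, hx⟩ := List.exists_mem_of_ne_nil arr hne
          have h1 : (0 : Int) < pvCnt arr x := by
            unfold pvCnt
            exact_mod_cast List.count_pos_iff.mpr hx
          have := hall x hx
          omega
        have hcondA : pvCond threshold (PySem.Dict.counter arr) = true := by
          rw [pvCond_true_iff]
          refine ⟨hvalsne, fun w hw => ?_⟩
          rw [hvals] at hw
          obtain ⟨v, hv, rfl⟩ := List.mem_map.mp hw
          exact hall v ((PySem.Set.mem_ofList _ _).mp hv)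
        rw [pvLoop, dif_pos ⟨hitems, hcondA⟩]
        -- the state after the first pass is the model at time 1
        have hm1 : pvModels threshold arr items 1
            (pvPass threshold items (PySem.Dict.counter arr,
              (PySem.Dict.counter arr).keys.foldl (fun d x => d.insert x (0 : Int))
                PySem.Dict.empty)) := by
          have hsn0 : ((PySem.Dict.counter arr).keys.foldl
              (fun d x => d.insert x (0 : Int)) PySem.Dict.empty).keys.Nodup := by
            exact PySem.Dict.nodup_keys_foldl_insert _ (fun _ _ => 0) _
              (by simp [PySem.Dict.keys_empty])
          have hspec := pvPass_spec threshold hθ1 items (PySem.Dict.counter arr) _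
            (fun v => if v ∈ arr then some (pvCnt arr v) else none)
            (fun v => if v ∈ arr then some (0 : Int) else none)
            (PySem.Dict.nodup_keys_counter arr) hsn0
            (fun v => pvCounter_get? arr v)
            (fun v => pvSteps0_get? arr v)
            (fun v c hc => by
              simp only [] at hc
              by_cases hv : v ∈ arr
              · rw [if_pos hv] at hc
                injection hc with hc
                have := hall v hv
                omega
              · rw [if_neg hv] at hc
                cases hc)
            (fun v => by by_cases hv : v ∈ arr <;> simp [hv])
          refine ⟨?_, hspec.2.1, ?_, ?_⟩
          · rw [pvPass_fst, pvKeys_passD, PySem.Dict.keys_counter]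
            rfl
          · intro v
            have h1 := hspec.2.2.1 v
            simp only [] at h1
            by_cases hva : v ∈ arr
            · rw [if_pos hva] at h1
              simp only [Option.isSome_some, true_or, if_true, Option.getD_some] at h1
              rw [h1, if_pos ((pvMem_pvKL arr items v).mpr (Or.inl hva))]
              congr 1
              unfold pvMval pvCnt
              omega
            · by_cases hvi : v ∈ items
              · rw [if_neg hva] at h1
                simp only [Option.isSome_none, Bool.false_eq_true, false_or, hvi, if_true,
                  Option.getD_none] at h1
                rw [h1, if_pos ((pvMem_pvKL arr items v).mpr (Or.inr hvi))]
                congr 1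
                have hc0 : List.count v arr = 0 := List.count_eq_zero.mpr hva
                unfold pvMval pvCnt
                rw [hc0]
                push_cast
                omega
              · rw [if_neg hva] at h1
                simp only [Option.isSome_none, Bool.false_eq_true, false_or, hvi,
                  if_false] at h1
                rw [h1, if_neg (fun hx => by
                  rcases (pvMem_pvKL arr items v).mp hx with h | h
                  exacts [hva h, hvi h])]
          · intro v
            have h1 := hspec.2.2.2 v
            simp only [] at h1
            by_cases hva : v ∈ arr
            · rw [if_pos hva] at h1
              rw [if_pos hva] at h1
              simp only [Option.isSome_some, true_or, if_true, Option.getD_some] at h1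
              rw [h1, if_pos ((pvMem_pvKL arr items v).mpr (Or.inl hva))]
              congr 1
              unfold pvMval pvCnt
              omega
            · by_cases hvi : v ∈ items
              · rw [if_neg hva] at h1
                rw [if_neg hva] at h1
                simp only [Option.isSome_none, Bool.false_eq_true, false_or, hvi, if_true,
                  Option.getD_none] at h1
                rw [h1, if_pos ((pvMem_pvKL arr items v).mpr (Or.inr hvi))]
                congr 1
                have hc0 : List.count v arr = 0 := List.count_eq_zero.mpr hva
                unfold pvMval pvCnt
                rw [hc0]
                push_cast
                omega
              · rw [if_neg hva] at h1
                simp only [Option.isSome_none, Bool.false_eq_true, false_or, hvi,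
                  if_false] at h1
                rw [h1, if_neg (fun hx => by
                  rcases (pvMem_pvKL arr items v).mp hx with h | h
                  exacts [hva h, hvi h])]
        have hcondM_iff := pvCondM_iff threshold arr items hθ1 hitems hall
        have hcond0 : pvCondM threshold arr items 0 := by
          intro v hv
          unfold pvMval
          simp only [zero_mul, add_zero]
          rw [pvMin_lt_iff]
          by_cases hva : v ∈ arr
          · exact hall v hva
          · have hc0 : List.count v arr = 0 := List.count_eq_zero.mpr hva
            unfold pvCnt
            rw [hc0]
            push_cast
            omega
        have hTpos : (0 : Int) < pvTstar threshold arr items := (hcondM_iff 0).mp hcond0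
        have hncTs : ¬ pvCondM threshold arr items (pvTstar threshold arr items) := by
          rw [hcondM_iff]
          omega
        obtain ⟨T', hT'ge, hmods, hnc', hint⟩ :=
          pvLoop_models threshold arr items hθ1 hne hitems
            (pvTstar threshold arr items - 1).toNat 1 _
            (by rw [pvPass_fst]
                exact pvPassD_nodup _ _ _ (PySem.Dict.nodup_keys_counter arr))
            hm1
            (by
              rw [show (1 : Int) + ((pvTstar threshold arr items - 1).toNat : Int)
                  = pvTstar threshold arr items by omega]
              exact hncTs)
        have hT'eq : T' = pvTstar threshold arr items := by
          have hge : pvTstar threshold arr items ≤ T' := by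
            by_contra hlt
            push_neg at hlt
            exact hnc' ((hcondM_iff T').mpr hlt)
          rcases eq_or_lt_of_le hge with h | h
          · exact h.symm
          · exact absurd (hint (pvTstar threshold arr items) (by omega) h) hncTs
        rw [hT'eq] at hmods
        obtain ⟨hkf, hsnf, hdf, hsf⟩ := hmods
        -- rewrite B's target dict into a counter and its T into pvTstar
        have hBt : arr.foldl (fun d x => d.insert (PySem.Int.floordiv x k)
              (d.getD (PySem.Int.floordiv x k) 0 + 1)) PySem.Dict.empty
            = PySem.Dict.counter items := by
          rw [← PySem.Dict.foldl_insert_getD_add_one_eq_counter items, hitemsdef,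
            List.foldl_map]
        rw [hBt]
        have hTB : (PySem.List.min? ((PySem.Dict.counter items).items.map
              (fun p => -(PySem.Int.floordiv (threshold
                - (PySem.Dict.counter arr).getD p.1 0) (-p.2)))) (fun y => y)).getD 0
            = pvTstar threshold arr items := by
          rw [PySem.Dict.items_counter, List.map_map]
          unfold pvTstar
          congr 2
          apply List.map_congr_left
          intro v hv
          simp only [Function.comp]
          rw [PySem.Dict.getD_counter]
          rfl
        simp only [hTB]
        exact pvFinal threshold arr items _ hθ1 hall hkf hdf hsf hncTs
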